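-- pv_equiv track=rewrite | github.com/HeavenzFire/-JUDGEMENT-DAY- | family_safety_coordinator.py | _aggregate_maternal_indicators
-- ===== SOURCE A (Python) =====
-- from typing import Dict, List, Optional
--
-- def _aggregate_maternal_indicators(mothers: List[Dict]) -> Dict:
--     """Aggregate maternal health indicators"""
--     aggregated = {}
--
--     for mother in mothers:
--         indicators = mother.get("indicators", {})
--         for key, value in indicators.items():
--             if key not in aggregated:
--                 aggregated[key] = False
--             if value:
--                 aggregated[key] = True
--
--     return aggregated
-- ===== SOURCE B (Python) =====
-- from typing import Dict, List, Optional
--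
-- def _aggregate_maternal_indicators(mothers: List[Dict]) -> Dict:
--     """Aggregate maternal health indicators (flatten, dedupe keys, per-key any)."""
--     entries = [(key, bool(value))
--                for mother in mothers
--                for key, value in mother.get("indicators", {}).items()]
--     return {key: any(v for k, v in entries if k == key)
--             for key in dict.fromkeys(k for k, _ in entries)}
-- ===== Notes on version B (the rewrite author's own statement) =====
-- stated objective: alternative
-- what changed: Replaces A's single pass maintaining an OR-accumulator dict with a flatten-then-scan structure: flatten all (key, bool) indicator entries into one list, take the keys deduplicated in first-occurrence order via dict.fromkeys, and compute each key's value as any() over a per-key scan of the flat entry list.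
import Mathlib
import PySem

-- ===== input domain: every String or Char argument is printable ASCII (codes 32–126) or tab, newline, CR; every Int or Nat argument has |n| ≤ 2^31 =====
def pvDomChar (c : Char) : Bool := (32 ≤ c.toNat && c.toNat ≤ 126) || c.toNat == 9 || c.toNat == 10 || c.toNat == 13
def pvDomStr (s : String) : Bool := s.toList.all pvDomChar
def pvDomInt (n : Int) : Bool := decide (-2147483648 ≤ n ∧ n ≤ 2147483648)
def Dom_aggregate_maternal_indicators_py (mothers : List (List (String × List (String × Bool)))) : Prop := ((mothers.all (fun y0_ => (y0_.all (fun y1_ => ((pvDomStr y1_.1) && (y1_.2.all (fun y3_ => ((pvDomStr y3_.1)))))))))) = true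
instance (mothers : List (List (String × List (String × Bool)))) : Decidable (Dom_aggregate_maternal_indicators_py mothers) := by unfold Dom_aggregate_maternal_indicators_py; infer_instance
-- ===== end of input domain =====

-- B replaces A's incremental OR-maintaining dict with flatten entries + dedupe keys + per-key any scan (alternative, not faster).

-- ===== PORT A =====
-- one indicator entry: 'if key not in aggregated: aggregated[key] = False; if value: aggregated[key] = True'
def pvStepA (agg : PySem.Dict String Bool) (p : String × Bool) : PySem.Dict String Bool :=
  let agg1 := if agg.contains p.1 then agg else agg.insert p.1 false
  if p.2 then agg1.insert p.1 true else agg1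

def aggregate_maternal_indicators_py (mothers : List (List (String × List (String × Bool)))) : List (String × Bool) :=
  (mothers.foldl
    (fun agg mother => ((PySem.Dict.mk mother).getD "indicators" []).foldl pvStepA agg)
    PySem.Dict.empty).items

-- ===== PORT B =====
-- entries = the flattened [(key, bool(value)) …] list of Source B
def pvEntries (mothers : List (List (String × List (String × Bool)))) : List (String × Bool) :=
  mothers.flatMap (fun mother => (PySem.Dict.mk mother).getD "indicators" [])

def aggregate_maternal_indicators_py_alt (mothers : List (List (String × List (String × Bool)))) : List (String × Bool) :=
  (PySem.List.dedup ((pvEntries mothers).map Prod.fst)).map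
    (fun key => (key, (pvEntries mothers).any (fun e => e.1 == key && e.2)))

-- ===== PRECONDITION & SPEC =====
def Spec_aggregate_maternal_indicators_py (mothers : List (List (String × List (String × Bool)))) (out : List (String × Bool)) : Prop := out = aggregate_maternal_indicators_py_alt mothers
instance (mothers : List (List (String × List (String × Bool)))) (out : List (String × Bool)) : Decidable (Spec_aggregate_maternal_indicators_py mothers out) := by unfold Spec_aggregate_maternal_indicators_py; infer_instance

-- ===== CLAIM (what is proved, stated in full; the proofs are below) =====
def Claim_equal_aggregate_maternal_indicators_py : Prop := ∀ (mothers : List (List (String × List (String × Bool)))), Dom_aggregate_maternal_indicators_py mothers → Spec_aggregate_maternal_indicators_py mothers (aggregate_maternal_indicators_py mothers)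

-- ===== LEMMAS AND PROOFS =====

-- keys of a list of entries, deduplicated in first-occurrence order, relative to already-seen keys
def pvFresh (seen : List String) : List (String × Bool) → List String
  | [] => []
  | p :: rest => if p.1 ∈ seen then pvFresh seen rest else p.1 :: pvFresh (seen ++ [p.1]) rest

lemma pvFresh_not_seen {seen : List String} {l : List (String × Bool)} {k : String}
    (h : k ∈ pvFresh seen l) : k ∉ seen := by
  induction l generalizing seen with
  | nil => simp [pvFresh] at h
  | cons p rest ih =>
    by_cases hm : p.1 ∈ seen
    · rw [pvFresh, if_pos hm] at h; exact ih h
    · rw [pvFresh, if_neg hm] at h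
      rcases List.mem_cons.mp h with h | h
      · exact h ▸ hm
      · intro hk; exact ih h (by simp [hk])

-- A's nested loops are one fold over the flattened entry list
lemma pvA_flatten (mothers : List (List (String × List (String × Bool))))
    (d : PySem.Dict String Bool) :
    mothers.foldl (fun agg mother => ((PySem.Dict.mk mother).getD "indicators" []).foldl pvStepA agg) d
      = (pvEntries mothers).foldl pvStepA d := by
  induction mothers generalizing d with
  | nil => rfl
  | cons m ms ih =>
    rw [List.foldl_cons, ih]
    simp [pvEntries, List.foldl_append]

-- bridge: B's dedup (= Set.ofList = foldl Set.add) is pvFresh from the empty seen list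
lemma pvFresh_ofList (ent : List (String × Bool)) (s : List String) :
    (ent.map Prod.fst).foldl PySem.Set.add s = s ++ pvFresh s ent := by
  induction ent generalizing s with
  | nil => simp [pvFresh]
  | cons p rest ih =>
    by_cases hm : p.1 ∈ s
    · simp [pvFresh, hm, ih s]
    · simp [pvFresh, hm, ih (s ++ [p.1])]

-- main invariant: the fold's items are the old items OR-updated by the entries,
-- followed by the fresh keys with their any-values
lemma pvMain (ent : List (String × Bool)) (d : PySem.Dict String Bool) (hnd : d.keys.Nodup) :
    (ent.foldl pvStepA d).items
      = d.items.map (fun kv => (kv.1, kv.2 || ent.any (fun e => e.1 == kv.1 && e.2)))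
        ++ (pvFresh d.keys ent).map (fun key => (key, ent.any (fun e => e.1 == key && e.2))) := by
  induction ent generalizing d with
  | nil => simp [pvFresh]
  | cons p rest ih =>
    by_cases hc : d.contains p.1 = true
    · -- key already present: d' has same keys, item for p.1 OR-ed with p.2
      have hmem : p.1 ∈ d.keys := (PySem.Dict.contains_iff_mem_keys d p.1).mp hc
      have hd' : (pvStepA d p).items
          = d.items.map (fun q => if q.1 == p.1 then (p.1, q.2 || p.2) else q) := by
        cases hv : p.2 with
        | false =>
          simp only [pvStepA, hc, if_true, hv, Bool.false_eq_true, if_false]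
          symm
          conv_rhs => rw [← List.map_id d.items]
          refine List.map_congr_left ?_
          intro q hq
          by_cases h1 : q.1 = p.1 <;> simp [h1, Prod.ext_iff]
        | true =>
          simp only [pvStepA, hc, if_true, hv, if_true]
          rw [PySem.Dict.items_insert_of_contains _ _ hc]
          refine List.map_congr_left ?_
          intro q hq
          by_cases h1 : q.1 = p.1 <;> simp [h1]
      have hk' : (pvStepA d p).keys = d.keys := by
        simp only [PySem.Dict.keys, hd', List.map_map]
        refine List.map_congr_left ?_
        intro q hq
        by_cases h1 : q.1 = p.1 <;> simp [Function.comp, h1]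
      have hnd' : (pvStepA d p).keys.Nodup := hk' ▸ hnd
      rw [List.foldl_cons, ih _ hnd', hd', hk', List.map_map]
      congr 1
      · refine List.map_congr_left ?_
        intro q hq
        by_cases h1 : q.1 = p.1
        · simp [Function.comp, h1, List.any_cons, Bool.or_assoc]
        · have hb : (p.1 == q.1) = false := beq_eq_false_iff_ne.mpr (fun h => h1 h.symm)
          simp [Function.comp, h1, hb]
      · rw [pvFresh, if_pos hmem]
        refine List.map_congr_left ?_
        intro k hk
        have hkn : k ∉ d.keys := pvFresh_not_seen hk
        have hb : (p.1 == k) = false := beq_eq_false_iff_ne.mpr (fun h => hkn (h ▸ hmem))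
        simp [List.any_cons, hb]
    · -- fresh key: d' = d.insert p.1 p.2, items appended, key appended to seen
      have hcf : d.contains p.1 = false := by simpa using hc
      have hnm : p.1 ∉ d.keys := fun h => hc ((PySem.Dict.contains_iff_mem_keys d p.1).mpr h)
      have hd' : (pvStepA d p).items = d.items ++ [(p.1, p.2)] := by
        cases hv : p.2 with
        | false =>
          simp only [pvStepA, hcf, Bool.false_eq_true, if_false, hv]
          exact PySem.Dict.items_insert_of_not_contains _ _ hcf
        | true =>
          simp only [pvStepA, hcf, Bool.false_eq_true, if_false, hv, if_true,
            PySem.Dict.insert_insert_self]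
          exact PySem.Dict.items_insert_of_not_contains _ _ hcf
      have hk' : (pvStepA d p).keys = d.keys ++ [p.1] := by
        simp [PySem.Dict.keys, hd']
      have hnd' : (pvStepA d p).keys.Nodup := by
        rw [hk']
        simp [List.nodup_append, hnd]
        intro a ha h
        exact hnm (h ▸ ha)
      rw [List.foldl_cons, ih _ hnd', hd', hk', pvFresh, if_neg hnm]
      simp only [List.map_append, List.map_cons, List.map_nil, List.append_assoc,
        List.cons_append, List.nil_append]
      congr 1
      · refine List.map_congr_left ?_
        intro q hq
        have hqk : q.1 ∈ d.keys := by
          simp only [PySem.Dict.keys]; exact List.mem_map_of_mem hq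
        have hb : (p.1 == q.1) = false := beq_eq_false_iff_ne.mpr (fun h => hnm (h ▸ hqk))
        simp [List.any_cons, hb]
      · congr 1
        · simp [List.any_cons]
        · refine List.map_congr_left ?_
          intro k hk
          have hkn : k ∉ d.keys ++ [p.1] := pvFresh_not_seen hk
          have hb : (p.1 == k) = false := beq_eq_false_iff_ne.mpr
            (fun h => hkn (by simp [h]))
          simp [List.any_cons, hb]

-- ===== VERDICT (by name: the statement is the Claim_ definition above) =====
theorem aggregate_maternal_indicators_py_spec : Claim_equal_aggregate_maternal_indicators_py := by
  intro mothers _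
  unfold Spec_aggregate_maternal_indicators_py aggregate_maternal_indicators_py
    aggregate_maternal_indicators_py_alt
  rw [pvA_flatten]
  rw [pvMain _ PySem.Dict.empty (by simp)]
  rw [PySem.List.dedup_eq_ofList, PySem.Set.ofList_eq_foldl, pvFresh_ofList]
  simp [PySem.Dict.empty, PySem.Dict.keys]
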